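-- pv_equiv track=rewrite | github.com/Warpand/SpiFF | spiff/utils.py | triple_wise
-- ===== SOURCE A (Python) =====
-- from typing import Iterable, Iterator, Tuple, TypeVar
--
-- T = TypeVar("T")
--
-- def triple_wise(iterable: Iterable[T]) -> Iterator[Tuple[T, T, T]]:
--     it = iter(iterable)
--     while True:
--         try:
--             one = next(it)
--             two = next(it)
--             three = next(it)
--         except StopIteration:
--             break
--         yield one, two, three
-- ===== SOURCE B (Python) =====
-- def triple_wise(iterable):
--     xs = list(iterable)
--     return iter(zip(xs[::3], xs[1::3], xs[2::3]))
-- ===== Notes on version B (the rewrite author's own statement) =====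
-- stated objective: idiomatic
-- what changed: Instead of one consuming pass pulling three consecutive items per step with try/except StopIteration, B materializes the input once and zips three strided slices xs[::3], xs[1::3], xs[2::3]; zip's truncation drops the 1-2 element remainder.
import Mathlib
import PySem

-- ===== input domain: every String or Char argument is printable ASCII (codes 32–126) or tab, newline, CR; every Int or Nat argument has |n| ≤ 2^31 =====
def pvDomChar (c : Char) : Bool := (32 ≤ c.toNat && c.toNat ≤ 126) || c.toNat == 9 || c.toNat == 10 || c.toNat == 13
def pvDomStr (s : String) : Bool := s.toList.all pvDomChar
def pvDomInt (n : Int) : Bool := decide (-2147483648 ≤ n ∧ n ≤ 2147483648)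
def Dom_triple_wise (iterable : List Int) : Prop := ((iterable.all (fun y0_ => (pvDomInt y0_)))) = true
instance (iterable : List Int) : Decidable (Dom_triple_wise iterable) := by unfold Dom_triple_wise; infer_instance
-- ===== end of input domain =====

-- B replaces A's consuming loop (three next() calls per step, try/except StopIteration)
-- by zipping three strided slices xs[::3], xs[1::3], xs[2::3] of the materialized input (idiomatic; same cost).

-- ===== PORT A =====
-- A: repeatedly pull three items from the iterator; any StopIteration among them ends the generator.
def triple_wise (iterable : List Int) : List (Int × Int × Int) :=
  match iterable with
  | one :: two :: three :: rest => (one, two, three) :: triple_wise rest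
  | _ => []

-- ===== PORT B =====
-- Hand port (PySem.List.slice has no step): Python's extended slice xs[::3] takes every
-- third element; exact for step 3 with an empty start, since 'drop' clamps like Python.
def pvStride3 (l : List Int) : List Int :=
  match l with
  | [] => []
  | x :: xs => x :: pvStride3 (xs.drop 2)
termination_by l.length
decreasing_by simp

-- xs[a::3] (a ≥ 0) = pvStride3 (xs.drop a); zip(...) truncates to the shortest, like Python's zip.
def triple_wise_alt (iterable : List Int) : List (Int × Int × Int) :=
  (pvStride3 iterable).zip ((pvStride3 (iterable.drop 1)).zip (pvStride3 (iterable.drop 2)))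

-- ===== PRECONDITION & SPEC =====
def Spec_triple_wise (iterable : List Int) (out : List (Int × Int × Int)) : Prop := out = triple_wise_alt iterable
instance (iterable : List Int) (out : List (Int × Int × Int)) : Decidable (Spec_triple_wise iterable out) := by unfold Spec_triple_wise; infer_instance

-- ===== CLAIM (what is proved, stated in full; the proofs are below) =====
def Claim_equal_triple_wise : Prop := ∀ (iterable : List Int), Dom_triple_wise iterable → Spec_triple_wise iterable (triple_wise iterable)

-- ===== LEMMAS AND PROOFS =====
theorem pvStride3_nil : pvStride3 [] = [] := by simp [pvStride3]

theorem pvStride3_cons (x : Int) (xs : List Int) :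
    pvStride3 (x :: xs) = x :: pvStride3 (xs.drop 2) := by simp [pvStride3]

theorem pv_agree (iterable : List Int) :
    triple_wise_alt iterable = triple_wise iterable := by
  induction iterable using triple_wise.induct with
  | case1 a b c r ih =>
      simp [triple_wise, triple_wise_alt, pvStride3_cons, List.zip] at *
      simpa using ih
  | case2 l h =>
      rcases l with _ | ⟨a, _ | ⟨b, _ | ⟨c, r⟩⟩⟩
      · simp [triple_wise, triple_wise_alt, pvStride3_nil, List.zip]
      · simp [triple_wise, triple_wise_alt, pvStride3_nil, pvStride3_cons, List.zip]
      · simp [triple_wise, triple_wise_alt, pvStride3_nil, pvStride3_cons, List.zip]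
      · exact absurd rfl (h a b c r)

-- ===== VERDICT (by name: the statement is the Claim_ definition above) =====
theorem triple_wise_spec : Claim_equal_triple_wise := by
  intro l _
  unfold Spec_triple_wise
  exact (pv_agree l).symm
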